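-- pv_equiv track=rewrite | github.com/imcgeoch/wasm-project | src/scripts/dec_eq_enum.py | write_decEq
-- ===== SOURCE A (Python) =====
-- def write_decEq(tp_name, val_cons):
--
--     def write_lemma(v1, v2):
--         name = "{}_not_{}".format(v1.lower(), v2)
--         tp = "{} = {} -> Void".format(v1, v2)
--         sig = "{} : {}".format(name, tp)
--         impl = "{} Refl impossible".format(name)
--         return name, '\n'.join([sig, impl])
--
--     header = "DecEq {} where".format(tp_name)
--     lemmas = {}
--     impl_lines = []
--     for v1 in val_cons:
--         for v2 in val_cons:
--             if v1 is v2: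
--                 line = "    decEq {} {} = Yes Refl".format(v1, v2)
--             elif (v2, v1) in lemmas:
--                 name, lemma = lemmas[(v2, v1)]
--                 line = "    decEq {} {} = No (negEqSym {})".format(v1, v2, name)
--             else:
--                 name, lemma = write_lemma(v1, v2)
--                 lemmas[(v1, v2)] = (name, lemma)
--                 line = "    decEq {} {} = No {}".format(v1, v2, name)
--
--             impl_lines.append(line)
--     lems = "\n\n".join([x[1] for x in lemmas.values()])
--     lines = ["-- autogen lemmas to assist implementing DecEq for {}".format(tp_name),
--              lems,
--              "\n\n||| autogen implementation of DecEq for {}".format(tp_name),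
--              header] + impl_lines
--
--     return '\n'.join(lines)
-- ===== SOURCE B (Python) =====
-- def write_decEq(tp_name, val_cons):
--     # Stateless re-implementation: instead of threading a lemma dict through the
--     # nested loop, decide each line purely from the positions i, j of the two
--     # constructors (i == j -> Yes Refl; i < j -> No lemma; i > j -> negEqSym),
--     # and build the lemma block for all i < j pairs in one comprehension.
--     def lemma_name(a, b):
--         return "{}_not_{}".format(a.lower(), b)
--
--     pairs = list(enumerate(val_cons))
--     lemma_texts = ["{0} : {1} = {2} -> Void\n{0} Refl impossible".format(lemma_name(v1, v2), v1, v2)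
--                    for (i, v1) in pairs for (j, v2) in pairs if i < j]
--
--     def impl_line(i, v1, j, v2):
--         if i == j:
--             return "    decEq {} {} = Yes Refl".format(v1, v2)
--         if i < j:
--             return "    decEq {} {} = No {}".format(v1, v2, lemma_name(v1, v2))
--         return "    decEq {} {} = No (negEqSym {})".format(v1, v2, lemma_name(v2, v1))
--
--     impl_lines = [impl_line(i, v1, j, v2) for (i, v1) in pairs for (j, v2) in pairs]
--     return '\n'.join(["-- autogen lemmas to assist implementing DecEq for {}".format(tp_name),
--                       "\n\n".join(lemma_texts),
--                       "\n\n||| autogen implementation of DecEq for {}".format(tp_name),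
--                       "DecEq {} where".format(tp_name)] + impl_lines)
-- ===== Notes on version B (the rewrite author's own statement) =====
-- stated objective: simpler
-- what changed: B drops A's lemma dictionary threaded through the nested loop entirely: each decEq line is decided purely from the positions i, j of the two constructors (i = j -> Yes Refl, i < j -> No lemma, i > j -> negEqSym), and the lemma block is built by one i < j comprehension.
import Mathlib
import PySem

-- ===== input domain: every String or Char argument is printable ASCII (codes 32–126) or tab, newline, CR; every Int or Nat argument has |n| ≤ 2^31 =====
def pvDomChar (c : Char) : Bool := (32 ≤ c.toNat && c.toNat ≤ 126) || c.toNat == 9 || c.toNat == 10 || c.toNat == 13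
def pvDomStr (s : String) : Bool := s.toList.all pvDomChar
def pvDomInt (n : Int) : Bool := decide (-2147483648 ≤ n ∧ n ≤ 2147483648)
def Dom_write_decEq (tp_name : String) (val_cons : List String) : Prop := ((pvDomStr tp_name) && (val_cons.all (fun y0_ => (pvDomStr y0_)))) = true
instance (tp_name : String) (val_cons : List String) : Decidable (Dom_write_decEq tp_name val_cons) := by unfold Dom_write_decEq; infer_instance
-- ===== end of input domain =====

-- B replaces A's lemma-dict threaded through the nested loop by a stateless positional
-- rule (i = j / i < j / i > j) plus one comprehension for the lemma block (objective: simpler).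

-- ===== PORT A =====
def wdA_write_lemma (v1 v2 : String) : String × String :=
  let name := PySem.Str.lower v1 ++ "_not_" ++ v2
  let tp := v1 ++ " = " ++ v2 ++ " -> Void"
  let sig := name ++ " : " ++ tp
  let impl := name ++ " Refl impossible"
  (name, PySem.Str.join "\n" [sig, impl])

-- the body of A's inner loop; Python's 'v1 is v2' is object identity, which on the
-- admitted inputs (Pre_: no duplicate constructor names) holds exactly for the same
-- list position, so it is ported as equality of the enumerate indices
def wdA_step (p1 : Int × String)
    (st : PySem.Dict (String × String) (String × String) × List String)
    (p2 : Int × String) :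
    PySem.Dict (String × String) (String × String) × List String :=
  if p1.1 = p2.1 then
    (st.1, st.2 ++ ["    decEq " ++ p1.2 ++ " " ++ p2.2 ++ " = Yes Refl"])
  else
    match st.1.get? (p2.2, p1.2) with
    | some nl => (st.1, st.2 ++ ["    decEq " ++ p1.2 ++ " " ++ p2.2 ++ " = No (negEqSym " ++ nl.1 ++ ")"])
    | none =>
      (st.1.insert (p1.2, p2.2) (wdA_write_lemma p1.2 p2.2),
       st.2 ++ ["    decEq " ++ p1.2 ++ " " ++ p2.2 ++ " = No " ++ (wdA_write_lemma p1.2 p2.2).1])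

def write_decEq (tp_name : String) (val_cons : List String) : String :=
  let header := "DecEq " ++ tp_name ++ " where"
  let e := PySem.List.enumerate val_cons
  let st := e.foldl (fun st p1 => e.foldl (wdA_step p1) st)
    ((PySem.Dict.empty, []) : PySem.Dict (String × String) (String × String) × List String)
  let lems := PySem.Str.join "\n\n" ((st.1.values).map (·.2))
  PySem.Str.join "\n"
    (["-- autogen lemmas to assist implementing DecEq for " ++ tp_name,
      lems,
      "\n\n||| autogen implementation of DecEq for " ++ tp_name,
      header] ++ st.2)

-- ===== PORT B =====
def wdB_lemma_name (a b : String) : String := PySem.Str.lower a ++ "_not_" ++ b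

def wdB_lemma_text (v1 v2 : String) : String :=
  wdB_lemma_name v1 v2 ++ " : " ++ v1 ++ " = " ++ v2 ++ " -> Void\n" ++
    wdB_lemma_name v1 v2 ++ " Refl impossible"

def wdB_impl_line (i : Int) (v1 : String) (j : Int) (v2 : String) : String :=
  if i = j then "    decEq " ++ v1 ++ " " ++ v2 ++ " = Yes Refl"
  else if i < j then "    decEq " ++ v1 ++ " " ++ v2 ++ " = No " ++ wdB_lemma_name v1 v2
  else "    decEq " ++ v1 ++ " " ++ v2 ++ " = No (negEqSym " ++ wdB_lemma_name v2 v1 ++ ")"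

def write_decEq_alt (tp_name : String) (val_cons : List String) : String :=
  let pairs := PySem.List.enumerate val_cons
  let lemma_texts := pairs.flatMap (fun p1 =>
    (pairs.filter (fun p2 => p1.1 < p2.1)).map (fun p2 => wdB_lemma_text p1.2 p2.2))
  let impl_lines := pairs.flatMap (fun p1 =>
    pairs.map (fun p2 => wdB_impl_line p1.1 p1.2 p2.1 p2.2))
  PySem.Str.join "\n"
    (["-- autogen lemmas to assist implementing DecEq for " ++ tp_name,
      PySem.Str.join "\n\n" lemma_texts,
      "\n\n||| autogen implementation of DecEq for " ++ tp_name,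
      "DecEq " ++ tp_name ++ " where"] ++ impl_lines)

-- ===== PRECONDITION & SPEC =====
-- Pre_ excludes lists with a duplicate constructor name: there A branches on Python
-- object identity ('v1 is v2'), whose outcome for equal strings is an accident of
-- CPython interning, not a specifiable value.
def Pre_write_decEq (tp_name : String) (val_cons : List String) : Prop := val_cons.Nodup
instance (tp_name : String) (val_cons : List String) : Decidable (Pre_write_decEq tp_name val_cons) := by unfold Pre_write_decEq; infer_instance

def pvWitness_write_decEq : String × List String := ("Ty", ["A", "B", "C"])

def Spec_write_decEq (tp_name : String) (val_cons : List String) (out : String) : Prop := out = write_decEq_alt tp_name val_cons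
instance (tp_name : String) (val_cons : List String) (out : String) : Decidable (Spec_write_decEq tp_name val_cons out) := by unfold Spec_write_decEq; infer_instance

-- ===== CLAIM (what is proved, stated in full; the proofs are below) =====
def Claim_equal_write_decEq : Prop := ∀ (tp_name : String) (val_cons : List String), Dom_write_decEq tp_name val_cons → Pre_write_decEq tp_name val_cons → Spec_write_decEq tp_name val_cons (write_decEq tp_name val_cons)

-- ===== LEMMAS AND PROOFS =====

-- the dict entries A has created after fully processing an outer element q
def wdEntries (l : List (Int × String)) (q : Int × String) : List ((String × String) × (String × String)) :=
  (l.filter (fun r => q.1 < r.1)).map (fun r => ((q.2, r.2), wdA_write_lemma q.2 r.2))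

-- the dict items after processing the outer elements `done`
def wdItems (ps done : List (Int × String)) : List ((String × String) × (String × String)) :=
  done.flatMap (wdEntries ps)

-- the impl lines produced by one outer round, in B's formulation
def wdRow (ps : List (Int × String)) (p1 : Int × String) : List String :=
  ps.map (fun p2 => wdB_impl_line p1.1 p1.2 p2.1 p2.2)

lemma wd_text_eq (a b : String) : (wdA_write_lemma a b).2 = wdB_lemma_text a b := by
  apply String.toList_inj.mp
  simp [wdA_write_lemma, wdB_lemma_text, wdB_lemma_name, PySem.Str.join,
    PySem.Chars.join_cons_cons, PySem.Chars.join_singleton]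

lemma wd_name_eq (a b : String) : (wdA_write_lemma a b).1 = wdB_lemma_name a b := rfl

lemma wd_get?_mk_none {κ ν : Type} [BEq κ] [LawfulBEq κ] (E : List (κ × ν)) (k : κ)
    (h : ∀ p ∈ E, p.1 ≠ k) : (PySem.Dict.mk E).get? k = none := by
  induction E with
  | nil => simp [PySem.Dict.get?]
  | cons p E ih =>
    cases p with
    | mk a b =>
      rw [PySem.Dict.get?_mk_cons]
      have : a ≠ k := h (a, b) (by simp)
      simp [this]
      exact ih (fun p hp => h p (by simp [hp]))

lemma wd_get?_mk_first {κ ν : Type} [BEq κ] [LawfulBEq κ] (E1 : List (κ × ν)) (k : κ) (v : ν)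
    (E2 : List (κ × ν)) (h : ∀ p ∈ E1, p.1 ≠ k) :
    (PySem.Dict.mk (E1 ++ (k, v) :: E2)).get? k = some v := by
  induction E1 with
  | nil => simp [PySem.Dict.get?_mk_cons]
  | cons p E ih =>
    cases p with
    | mk a b =>
      rw [List.cons_append, PySem.Dict.get?_mk_cons]
      have : a ≠ k := h (a, b) (by simp)
      simp [this]
      exact ih (fun p hp => h p (by simp [hp]))

lemma wd_insert_fresh {κ ν : Type} [BEq κ] [LawfulBEq κ] (E : List (κ × ν)) (k : κ) (v : ν)
    (h : ∀ p ∈ E, p.1 ≠ k) : (PySem.Dict.mk E).insert k v = PySem.Dict.mk (E ++ [(k, v)]) := by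
  apply PySem.Dict.ext
  have hc : (PySem.Dict.mk E).contains k = false := by
    rw [← Bool.not_eq_true, PySem.Dict.contains_iff_mem_keys]
    simp only [PySem.Dict.keys_mk, List.mem_map]
    rintro ⟨p, hp, hpk⟩
    exact h p hp hpk
  rw [PySem.Dict.items_insert_of_not_contains _ _ hc]

lemma wd_not_mem_middle {α : Type} (l1 l2 : List α) (a : α) (h : (l1 ++ a :: l2).Nodup) :
    a ∉ l1 := by
  have d := (List.nodup_append.mp h).2.2
  simp at d
  intro ha
  exact (d a ha).1 rfl

lemma wd_snd_inj (ps : List (Int × String)) (hsnd : (ps.map (·.2)).Nodup) :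
    ∀ p ∈ ps, ∀ q ∈ ps, p.2 = q.2 → p = q := by
  induction ps with
  | nil => simp
  | cons x ps ih =>
    rw [List.map_cons, List.nodup_cons] at hsnd
    intro p hp q hq hpq
    rcases List.mem_cons.mp hp with h1 | h1 <;> rcases List.mem_cons.mp hq with h2 | h2
    · rw [h1, h2]
    · exfalso; apply hsnd.1; rw [h1] at hpq; rw [hpq]; exact List.mem_map.mpr ⟨q, h2, rfl⟩
    · exfalso; apply hsnd.1; rw [h2] at hpq; rw [← hpq]; exact List.mem_map.mpr ⟨p, h1, rfl⟩
    · exact ih hsnd.2 p h1 q h2 hpq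

lemma wd_inner (ps : List (Int × String)) (hsnd : (ps.map (·.2)).Nodup)
    (hfst : ps.Pairwise (fun p q => p.1 < q.1))
    (p1 : Int × String) (hp1 : p1 ∈ ps)
    (done : List (Int × String)) (hdone_nd : done.Nodup)
    (hdone : ∀ q, q ∈ done ↔ q ∈ ps ∧ q.1 < p1.1) :
    ∀ (rest seen : List (Int × String)), seen ++ rest = ps →
    ∀ (acc : List String),
    rest.foldl (wdA_step p1) (PySem.Dict.mk (wdItems ps done ++ wdEntries seen p1), acc)
      = (PySem.Dict.mk (wdItems ps done ++ wdEntries ps p1),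
         acc ++ rest.map (fun p2 => wdB_impl_line p1.1 p1.2 p2.1 p2.2)) := by
  have hpsnd : ps.Nodup := List.Nodup.of_map _ hsnd
  have sinj := wd_snd_inj ps hsnd
  have hdsub : ∀ q ∈ done, q ∈ ps := fun q hq => ((hdone q).mp hq).1
  intro rest
  induction rest with
  | nil =>
    intro seen hs acc
    rw [List.append_nil] at hs
    subst hs
    simp
  | cons p2 rest' ih =>
    intro seen hs acc
    have hp2 : p2 ∈ ps := by rw [← hs]; simp
    have hstep : wdA_step p1 (PySem.Dict.mk (wdItems ps done ++ wdEntries seen p1), acc) p2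
        = (PySem.Dict.mk (wdItems ps done ++ wdEntries (seen ++ [p2]) p1),
           acc ++ [wdB_impl_line p1.1 p1.2 p2.1 p2.2]) := by
      by_cases h12 : p1.1 = p2.1
      · have hE : wdEntries (seen ++ [p2]) p1 = wdEntries seen p1 := by
          simp [wdEntries, List.filter_append, show ¬(p1.1 < p2.1) by omega]
        rw [hE]
        simp [wdA_step, wdB_impl_line, h12]
      · by_cases hlt : p2.1 < p1.1
        · -- the symmetric lemma was created in an earlier outer round: get? finds it
          have hp2d : p2 ∈ done := (hdone p2).mpr ⟨hp2, hlt⟩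
          obtain ⟨d1, d2, hd⟩ := List.append_of_mem hp2d
          have hF : p1 ∈ ps.filter (fun r => decide (p2.1 < r.1)) :=
            List.mem_filter.mpr ⟨hp1, by simpa using hlt⟩
          obtain ⟨F1, F2, hFsplit⟩ := List.append_of_mem hF
          have hp1F1 : p1 ∉ F1 :=
            wd_not_mem_middle _ _ _ (hFsplit ▸ hpsnd.filter _)
          have hp2d1 : p2 ∉ d1 := wd_not_mem_middle _ _ _ (hd ▸ hdone_nd)
          have hd1sub : ∀ q ∈ d1, q ∈ done := by intro q hq; rw [hd]; simp [hq]
          have hEdec : wdItems ps done ++ wdEntries seen p1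
              = (wdItems ps d1 ++ F1.map (fun r => ((p2.2, r.2), wdA_write_lemma p2.2 r.2)))
                ++ ((p2.2, p1.2), wdA_write_lemma p2.2 p1.2)
                :: (F2.map (fun r => ((p2.2, r.2), wdA_write_lemma p2.2 r.2))
                    ++ (wdItems ps d2 ++ wdEntries seen p1)) := by
            rw [hd]
            show (d1 ++ p2 :: d2).flatMap (wdEntries ps) ++ wdEntries seen p1 = _
            rw [List.flatMap_append, List.flatMap_cons]
            show wdItems ps d1 ++ ((ps.filter (fun r => decide (p2.1 < r.1))).map
              (fun r => ((p2.2, r.2), wdA_write_lemma p2.2 r.2)) ++ wdItems ps d2)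
              ++ wdEntries seen p1 = _
            rw [hFsplit, List.map_append, List.map_cons]
            simp [List.append_assoc]
          have hget : (PySem.Dict.mk (wdItems ps done ++ wdEntries seen p1)).get? (p2.2, p1.2)
              = some (wdA_write_lemma p2.2 p1.2) := by
            rw [hEdec]
            apply wd_get?_mk_first
            intro p hp
            rcases List.mem_append.mp hp with hp | hp
            · simp only [wdItems, wdEntries, List.mem_flatMap, List.mem_map,
                List.mem_filter] at hp
              obtain ⟨q, hq, r, ⟨hr, _⟩, rfl⟩ := hp
              simp only [ne_eq, Prod.mk.injEq, not_and]
              intro hq2 _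
              have : q = p2 := sinj q (hdsub q (hd1sub q hq)) p2 hp2 hq2
              exact absurd (this ▸ hq) hp2d1
            · simp only [List.mem_map] at hp
              obtain ⟨r, hr, rfl⟩ := hp
              simp only [ne_eq, Prod.mk.injEq, not_and]
              intro _ hr2
              have hrps : r ∈ ps := (List.mem_filter.mp
                (by rw [hFsplit]; exact List.mem_append_left _ hr)).1
              have : r = p1 := sinj r hrps p1 hp1 hr2
              exact absurd (this ▸ hr) hp1F1
          have hE : wdEntries (seen ++ [p2]) p1 = wdEntries seen p1 := by
            simp [wdEntries, List.filter_append, show ¬(p1.1 < p2.1) by omega]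
          rw [hE]
          simp [wdA_step, wdB_impl_line, h12, hget,
            show ¬(p1.1 < p2.1) by omega, wd_name_eq]
        · -- first encounter of this unordered pair: get? misses, a lemma is inserted
          have hgt : p1.1 < p2.1 := by omega
          have hseensub : ∀ r ∈ seen, r ∈ ps := by intro r hr; rw [← hs]; simp [hr]
          have hp2seen : p2 ∉ seen := wd_not_mem_middle _ _ _ (hs ▸ hpsnd)
          have hget : (PySem.Dict.mk (wdItems ps done ++ wdEntries seen p1)).get? (p2.2, p1.2)
              = none := by
            apply wd_get?_mk_none
            intro p hp
            rcases List.mem_append.mp hp with hp | hp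
            · simp only [wdItems, wdEntries, List.mem_flatMap, List.mem_map,
                List.mem_filter] at hp
              obtain ⟨q, hq, r, ⟨hr, _⟩, rfl⟩ := hp
              simp only [ne_eq, Prod.mk.injEq, not_and]
              intro hq2 _
              have : q = p2 := sinj q (hdsub q hq) p2 hp2 hq2
              have := ((hdone p2).mp (this ▸ hq)).2
              omega
            · simp only [wdEntries, List.mem_map, List.mem_filter] at hp
              obtain ⟨r, ⟨hr, _⟩, rfl⟩ := hp
              simp only [ne_eq, Prod.mk.injEq, not_and]
              intro hq2 _
              have : p1 = p2 := sinj p1 hp1 p2 hp2 hq2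
              rw [this] at h12
              exact h12 rfl
          have hfresh : ∀ p ∈ wdItems ps done ++ wdEntries seen p1, p.1 ≠ (p1.2, p2.2) := by
            intro p hp
            rcases List.mem_append.mp hp with hp | hp
            · simp only [wdItems, wdEntries, List.mem_flatMap, List.mem_map,
                List.mem_filter] at hp
              obtain ⟨q, hq, r, ⟨hr, _⟩, rfl⟩ := hp
              simp only [ne_eq, Prod.mk.injEq, not_and]
              intro hq2 _
              have : q = p1 := sinj q (hdsub q hq) p1 hp1 hq2
              have := ((hdone p1).mp (this ▸ hq)).2
              omega
            · simp only [wdEntries, List.mem_map, List.mem_filter] at hp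
              obtain ⟨r, ⟨hr, _⟩, rfl⟩ := hp
              simp only [ne_eq, Prod.mk.injEq, not_and]
              intro _ hr2
              have : r = p2 := sinj r (hseensub r hr) p2 hp2 hr2
              exact absurd (this ▸ hr) hp2seen
          have hE : wdEntries (seen ++ [p2]) p1
              = wdEntries seen p1 ++ [((p1.2, p2.2), wdA_write_lemma p1.2 p2.2)] := by
            simp [wdEntries, List.filter_append, hgt]
          rw [hE]
          simp only [wdA_step, h12, if_false, hget]
          rw [wd_insert_fresh _ _ _ hfresh]
          simp [wdB_impl_line, h12, hgt, wd_name_eq, List.append_assoc]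
    rw [List.foldl_cons, hstep, ih (seen ++ [p2]) (by simpa using hs) _]
    simp

lemma wd_outer (ps : List (Int × String)) (hsnd : (ps.map (·.2)).Nodup)
    (hfst : ps.Pairwise (fun p q => p.1 < q.1)) :
    ∀ (out done : List (Int × String)), done ++ out = ps →
    ∀ (acc : List String),
    out.foldl (fun st p1 => ps.foldl (wdA_step p1) st) (PySem.Dict.mk (wdItems ps done), acc)
      = (PySem.Dict.mk (wdItems ps (done ++ out)), acc ++ out.flatMap (wdRow ps)) := by
  have hpsnd : ps.Nodup := List.Nodup.of_map _ hsnd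
  intro out
  induction out with
  | nil => intro done hs acc; simp
  | cons p1 out' ih =>
    intro done hs acc
    have hp1 : p1 ∈ ps := by rw [← hs]; simp
    have hdone_nd : done.Nodup := by
      have : done.Sublist ps := by rw [← hs]; exact List.sublist_append_left _ _
      exact this.nodup hpsnd
    have hdone : ∀ q, q ∈ done ↔ q ∈ ps ∧ q.1 < p1.1 := by
      intro q
      constructor
      · intro hq
        refine ⟨by rw [← hs]; simp [hq], ?_⟩
        have hp := List.pairwise_append.mp (hs ▸ hfst)
        exact hp.2.2 q hq p1 (by simp)
      · rintro ⟨hqps, hqlt⟩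
        rw [← hs] at hqps
        rcases List.mem_append.mp hqps with h | h
        · exact h
        · exfalso
          rcases List.mem_cons.mp h with h | h
          · rw [h] at hqlt; omega
          · have hp := List.pairwise_append.mp (hs ▸ hfst)
            have := (List.pairwise_cons.mp hp.2.1).1 q h
            omega
    have hinner := wd_inner ps hsnd hfst p1 hp1 done hdone_nd hdone ps [] rfl acc
    have hnil : wdEntries ([] : List (Int × String)) p1 = [] := by simp [wdEntries]
    rw [List.foldl_cons]
    rw [show PySem.Dict.mk (wdItems ps done) = PySem.Dict.mk (wdItems ps done ++ wdEntries [] p1)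
      by rw [hnil, List.append_nil]]
    rw [hinner]
    rw [show wdItems ps done ++ wdEntries ps p1 = wdItems ps (done ++ [p1]) by
      simp [wdItems, List.flatMap_append]]
    rw [ih (done ++ [p1]) (by simpa using hs) _]
    simp [wdRow, List.append_assoc]

-- ===== VERDICT (by name: the statement is the Claim_ definition above) =====
theorem write_decEq_spec : Claim_equal_write_decEq := by
  intro tp_name val_cons _ hpre
  have hsnd : ((PySem.List.enumerate val_cons).map (·.2)).Nodup := by
    rw [PySem.List.map_snd_enumerate]; exact hpre
  have hfst := PySem.List.pairwise_lt_enumerate val_cons 0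
  have hst : (PySem.List.enumerate val_cons).foldl
      (fun st p1 => (PySem.List.enumerate val_cons).foldl (wdA_step p1) st)
      ((PySem.Dict.empty, []) :
        PySem.Dict (String × String) (String × String) × List String)
      = (PySem.Dict.mk (wdItems (PySem.List.enumerate val_cons) (PySem.List.enumerate val_cons)),
         (PySem.List.enumerate val_cons).flatMap (wdRow (PySem.List.enumerate val_cons))) := by
    have h := wd_outer (PySem.List.enumerate val_cons) hsnd hfst
      (PySem.List.enumerate val_cons) [] rfl []
    simpa using h
  have hlems : ((PySem.Dict.mk (wdItems (PySem.List.enumerate val_cons)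
        (PySem.List.enumerate val_cons))).values).map (fun x => x.2)
      = (PySem.List.enumerate val_cons).flatMap (fun p1 =>
          ((PySem.List.enumerate val_cons).filter (fun p2 => p1.1 < p2.1)).map
            (fun p2 => wdB_lemma_text p1.2 p2.2)) := by
    rw [PySem.Dict.values_mk, List.map_map]
    simp only [wdItems, List.map_flatMap, wdEntries, List.map_map, Function.comp_def,
      wd_text_eq]
  show write_decEq tp_name val_cons = write_decEq_alt tp_name val_cons
  unfold write_decEq write_decEq_alt
  dsimp only
  rw [hst, hlems]
  rfl
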